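-- pv_equiv track=rewrite | github.com/nayetdet/estrutura-de-dados | exercises/list01_5/src/ex05_h.py | cut_odds
-- ===== SOURCE A (Python) =====
-- def cut_odds(number: int) -> int:
--     digit = number % 10
--     cutted_digit = digit if digit % 2 == 1 else 0
--
--     if number < 10:
--         return cutted_digit
--
--     if cutted_digit == 1:
--         return cut_odds(number // 10)
--     return 10 * cut_odds(number // 10) + cutted_digit
-- ===== SOURCE B (Python) =====
-- def cut_odds(number: int) -> int:
--     if number < 10:
--         d = number % 10
--         return d if d % 2 == 1 else 0
--     digits = []
--     n = number
--     while n >= 10: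
--         digits.append(n % 10)
--         n //= 10
--     result = n if n % 2 == 1 else 0
--     for d in reversed(digits):
--         c = d if d % 2 == 1 else 0
--         if c == 1:
--             continue
--         result = result * 10 + c
--     return result
-- ===== Notes on version B (the rewrite author's own statement) =====
-- stated objective: alternative
-- what changed: Replaces A's recursion (peeling least-significant digits with recursive calls) by an explicit iterative version: a while-loop collects the digits, then a single fold over them in most-significant-first order rebuilds the result with an accumulator.
import Mathlib
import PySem

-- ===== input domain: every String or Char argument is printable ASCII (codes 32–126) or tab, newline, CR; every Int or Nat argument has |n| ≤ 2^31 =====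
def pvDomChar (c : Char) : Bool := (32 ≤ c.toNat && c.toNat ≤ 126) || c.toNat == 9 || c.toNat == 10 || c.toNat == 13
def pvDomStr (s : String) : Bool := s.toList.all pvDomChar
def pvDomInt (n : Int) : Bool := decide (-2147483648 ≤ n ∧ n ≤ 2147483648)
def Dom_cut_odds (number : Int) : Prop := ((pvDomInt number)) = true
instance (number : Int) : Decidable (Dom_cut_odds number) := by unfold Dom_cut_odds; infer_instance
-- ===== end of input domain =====

-- B replaces A's digit-peeling recursion with an explicit while-loop + fold (iterative decomposition); same cost.

-- ===== PORT A =====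
def cut_odds (number : Int) : Int :=
  let digit := PySem.Int.mod number 10
  let cutted_digit := if PySem.Int.mod digit 2 = 1 then digit else 0
  if number < 10 then cutted_digit
  else if cutted_digit = 1 then cut_odds (PySem.Int.floordiv number 10)
  else 10 * cut_odds (PySem.Int.floordiv number 10) + cutted_digit
termination_by number.toNat
decreasing_by
  all_goals
    rw [PySem.Int.floordiv_eq_ediv_of_pos (by norm_num)]
    omega

-- ===== PORT B =====
-- the while-loop of Source B: peel digits LSB-first into `digits` until n < 10
def pvPeel (n : Int) (digits : List Int) : Int × List Int :=
  if n ≥ 10 then pvPeel (PySem.Int.floordiv n 10) (digits ++ [PySem.Int.mod n 10])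
  else (n, digits)
termination_by n.toNat
decreasing_by
  rw [PySem.Int.floordiv_eq_ediv_of_pos (by norm_num)]
  omega

def cut_odds_alt (number : Int) : Int :=
  if number < 10 then
    let d := PySem.Int.mod number 10
    if PySem.Int.mod d 2 = 1 then d else 0
  else
    let p := pvPeel number []
    let result := if PySem.Int.mod p.1 2 = 1 then p.1 else 0
    p.2.reverse.foldl (fun result d =>
      let c := if PySem.Int.mod d 2 = 1 then d else 0
      if c = 1 then result else result * 10 + c) result

-- ===== PRECONDITION & SPEC =====
def Spec_cut_odds (number : Int) (out : Int) : Prop := out = cut_odds_alt number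
instance (number : Int) (out : Int) : Decidable (Spec_cut_odds number out) := by unfold Spec_cut_odds; infer_instance

-- ===== CLAIM (what is proved, stated in full; the proofs are below) =====
def Claim_equal_cut_odds : Prop := ∀ (number : Int), Dom_cut_odds number → Spec_cut_odds number (cut_odds number)

-- ===== LEMMAS AND PROOFS =====

theorem pvPeel_acc (n : Int) (acc : List Int) :
    pvPeel n acc = ((pvPeel n []).1, acc ++ (pvPeel n []).2) := by
  by_cases h : n ≥ 10
  · conv_lhs => rw [pvPeel]
    conv_rhs => rw [pvPeel]
    rw [if_pos h, if_pos h,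
      pvPeel_acc (PySem.Int.floordiv n 10) (acc ++ [PySem.Int.mod n 10]),
      pvPeel_acc (PySem.Int.floordiv n 10) ([] ++ [PySem.Int.mod n 10])]
    simp
  · rw [pvPeel, if_neg h, pvPeel, if_neg h]; simp
termination_by n.toNat
decreasing_by all_goals (rw [PySem.Int.floordiv_eq_ediv_of_pos (by norm_num)]; omega)

theorem cut_odds_alt_step (n : Int) (h : ¬ n < 10) :
    cut_odds_alt n =
      (let c := if PySem.Int.mod (PySem.Int.mod n 10) 2 = 1 then PySem.Int.mod n 10 else 0
       if c = 1 then cut_odds_alt (PySem.Int.floordiv n 10)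
       else 10 * cut_odds_alt (PySem.Int.floordiv n 10) + c) := by
  have hfd : PySem.Int.floordiv n 10 = n / 10 := PySem.Int.floordiv_eq_ediv_of_pos (by norm_num)
  have hq1 : 1 ≤ PySem.Int.floordiv n 10 := by rw [hfd]; omega
  conv_lhs => rw [cut_odds_alt]
  rw [if_neg h, pvPeel, if_pos (show n ≥ 10 by omega),
    pvPeel_acc (PySem.Int.floordiv n 10) ([] ++ [PySem.Int.mod n 10])]
  by_cases hs : PySem.Int.floordiv n 10 < 10
  · have hp : pvPeel (PySem.Int.floordiv n 10) [] = (PySem.Int.floordiv n 10, []) := by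
      rw [pvPeel, if_neg (by omega)]
    have halt : cut_odds_alt (PySem.Int.floordiv n 10)
        = if PySem.Int.mod (PySem.Int.floordiv n 10) 2 = 1 then PySem.Int.floordiv n 10 else 0 := by
      rw [cut_odds_alt, if_pos hs]
      have hm : PySem.Int.mod (PySem.Int.floordiv n 10) 10 = PySem.Int.floordiv n 10 := by
        rw [PySem.Int.mod_eq_emod_of_pos (by norm_num), hfd]
        exact Int.emod_eq_of_lt (by omega) (by omega)
      simp only [hm]
    simp only [hp, halt, List.nil_append, List.append_nil, List.reverse_cons, List.reverse_nil,
      List.foldl_cons, List.foldl_nil]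
    split_ifs <;> ring
  · have halt : cut_odds_alt (PySem.Int.floordiv n 10)
        = (pvPeel (PySem.Int.floordiv n 10) []).2.reverse.foldl
            (fun result d =>
              let c := if PySem.Int.mod d 2 = 1 then d else 0
              if c = 1 then result else result * 10 + c)
            (if PySem.Int.mod (pvPeel (PySem.Int.floordiv n 10) []).1 2 = 1
              then (pvPeel (PySem.Int.floordiv n 10) []).1 else 0) := by
      rw [cut_odds_alt, if_neg hs]
    simp only [halt, List.nil_append, List.reverse_cons, List.reverse_append, List.reverse_nil,
      List.foldl_append, List.foldl_cons, List.foldl_nil]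
    split_ifs <;> ring

theorem cut_odds_eq_alt (n : Int) : cut_odds n = cut_odds_alt n := by
  by_cases h : n < 10
  · rw [cut_odds, cut_odds_alt, if_pos h, if_pos h]
  · rw [cut_odds, cut_odds_alt_step n h,
      cut_odds_eq_alt (PySem.Int.floordiv n 10)]
    simp only [if_neg h]
termination_by n.toNat
decreasing_by all_goals (rw [PySem.Int.floordiv_eq_ediv_of_pos (by norm_num)]; omega)

-- ===== VERDICT (by name: the statement is the Claim_ definition above) =====
theorem cut_odds_spec : Claim_equal_cut_odds := by
  intro n _
  unfold Spec_cut_odds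
  exact cut_odds_eq_alt n
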